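-- pv_equiv track=rewrite | github.com/jreiher2003/intro-algorithms | lesson 1/problem set 1/eulerian_tour.py | is_tour
-- ===== SOURCE A (Python) =====
-- def is_tour(graph):
--     nodes = {}
--     for pair in graph:
--         for item in pair:
--             nodes.setdefault(item, 0)
--             nodes[item] += 1
--
--     for node in nodes:
--         if nodes[node] % 2 != 0:
--             return False
--     return True
-- ===== SOURCE B (Python) =====
-- def is_tour(graph):
--     ends = sorted(x for pair in graph for x in pair)
--     it = iter(ends)
--     # after sorting, every vertex has even degree iff consecutive entries pair up
--     return all(a == b for a, b in zip(it, it)) and len(ends) % 2 == 0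
-- ===== Notes on version B (the rewrite author's own statement) =====
-- stated objective: alternative
-- what changed: B replaces the degree-count dict and the second parity-checking loop by sort-then-pair: it sorts all endpoints and checks with zip(it, it) that consecutive entries pair up (plus an even total length), which holds iff every vertex has even degree.
import Mathlib
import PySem

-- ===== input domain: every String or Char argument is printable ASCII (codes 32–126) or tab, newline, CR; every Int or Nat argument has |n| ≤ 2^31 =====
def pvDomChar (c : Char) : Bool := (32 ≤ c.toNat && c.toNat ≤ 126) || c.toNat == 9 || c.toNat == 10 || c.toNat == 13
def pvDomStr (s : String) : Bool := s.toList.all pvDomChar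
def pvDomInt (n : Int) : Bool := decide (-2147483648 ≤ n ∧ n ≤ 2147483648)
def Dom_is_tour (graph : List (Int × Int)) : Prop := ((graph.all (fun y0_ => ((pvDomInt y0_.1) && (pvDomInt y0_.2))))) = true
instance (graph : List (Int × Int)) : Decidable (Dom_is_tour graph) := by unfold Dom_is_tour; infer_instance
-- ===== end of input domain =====

-- B replaces A's degree-count dict plus second parity loop by sort-then-pair: sort all
-- endpoints, then zip consecutive entries and check they pair up (objective: alternative).


-- ===== PORT A =====
-- nodes.setdefault(item, 0); nodes[item] += 1
def pvStepA (d : PySem.Dict Int Int) (item : Int) : PySem.Dict Int Int :=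
  let d := d.setdefault item 0
  d.insert item (d.getD item 0 + 1)

def is_tour (graph : List (Int × Int)) : Bool :=
  let nodes := graph.foldl (fun d pair => pvStepA (pvStepA d pair.1) pair.2) PySem.Dict.empty
  -- early-return loop over the dict's keys: 'if nodes[node] % 2 != 0: return False' then True
  nodes.keys.all (fun node => !(PySem.Int.mod (nodes.getD node 0) 2 != 0))

-- ===== PORT B =====
-- zip(it, it) over one iterator: consecutive disjoint pairs (an odd tail is dropped)
def pvPairs : List Int → List (Int × Int)
  | a :: b :: t => (a, b) :: pvPairs t
  | _ => []

def is_tour_alt (graph : List (Int × Int)) : Bool :=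
  let ends := PySem.List.sorted (graph.flatMap (fun pair => [pair.1, pair.2])) (fun x => x) false
  (pvPairs ends).all (fun p => p.1 == p.2) && (PySem.Int.mod (ends.length : Int) 2 == 0)

-- ===== PRECONDITION & SPEC =====
def Spec_is_tour (graph : List (Int × Int)) (out : Bool) : Prop := out = is_tour_alt graph
instance (graph : List (Int × Int)) (out : Bool) : Decidable (Spec_is_tour graph out) := by unfold Spec_is_tour; infer_instance

-- ===== CLAIM (what is proved, stated in full; the proofs are below) =====
def Claim_equal_is_tour : Prop := ∀ (graph : List (Int × Int)), Dom_is_tour graph → Spec_is_tour graph (is_tour graph)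

-- ===== LEMMAS AND PROOFS =====

-- proof-side helper: adjacent pairing as a single recursion
def pvPaired : List Int → Bool
  | [] => true
  | [_] => false
  | a :: b :: t => if a != b then false else pvPaired t

lemma pvAlt_eq_paired (l : List Int) :
    ((pvPairs l).all (fun p => p.1 == p.2) && (PySem.Int.mod (l.length : Int) 2 == 0)) = pvPaired l := by
  induction l using pvPaired.induct with
  | case1 => decide
  | case2 a => simp [pvPairs, pvPaired]
  | case3 a b t hne =>
    have hab : (a == b) = false := by simpa [bne_iff_ne] using hne
    simp [pvPairs, pvPaired, hne, hab]
  | case4 a b t hne ih =>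
    have hab : a = b := by simpa using hne
    subst hab
    simp only [pvPairs, pvPaired, List.all_cons, BEq.rfl, Bool.true_and, bne_self_eq_false,
      Bool.false_eq_true, if_false]
    rw [← ih]
    congr 1
    have hlen : (((a :: a :: t).length : Nat) : Int) = (t.length : Int) + 2 := by
      simp [List.length_cons]; ring
    rw [hlen, PySem.Int.mod_eq_emod_of_pos (by omega), PySem.Int.mod_eq_emod_of_pos (by omega)]
    congr 1
    omega

lemma pvStepA_getD (d : PySem.Dict Int Int) (i x : Int) :
    (pvStepA d i).getD x 0 = if x = i then d.getD i 0 + 1 else d.getD x 0 := by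
  unfold pvStepA
  simp only [PySem.Dict.getD_insert]
  by_cases h : x = i
  · rw [if_pos h, if_pos h, PySem.Dict.getD_setdefault_self]
  · rw [if_neg h, if_neg h, PySem.Dict.getD_eq_get?_getD,
      PySem.Dict.get?_setdefault_of_ne, ← PySem.Dict.getD_eq_get?_getD]
    exact h

lemma pvStepA_contains (d : PySem.Dict Int Int) (i x : Int) :
    (pvStepA d i).contains x = (x == i || d.contains x) := by
  unfold pvStepA
  rw [PySem.Dict.contains_insert]
  by_cases h : x = i
  · subst h
    simp
  · rw [show (x == i) = false from by simp [h]]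
    simp only [Bool.false_or]
    rw [PySem.Dict.contains_eq_isSome_get?, PySem.Dict.get?_setdefault_of_ne,
      ← PySem.Dict.contains_eq_isSome_get?]
    exact h

-- the pairwise fold over graph is the single fold over the flattened endpoint list
lemma pvFoldA_flat (graph : List (Int × Int)) (d : PySem.Dict Int Int) :
    graph.foldl (fun d pair => pvStepA (pvStepA d pair.1) pair.2) d
      = (graph.flatMap (fun pair => [pair.1, pair.2])).foldl pvStepA d := by
  induction graph generalizing d with
  | nil => rfl
  | cons p rest ih => simp [List.foldl, ih]

lemma pvFoldA_getD (l : List Int) (d : PySem.Dict Int Int) (x : Int) :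
    (l.foldl pvStepA d).getD x 0 = d.getD x 0 + l.count x := by
  induction l generalizing d with
  | nil => simp
  | cons a t ih =>
    rw [List.foldl_cons, ih, pvStepA_getD, List.count_cons]
    by_cases h : x = a <;> simp [h] <;> omega

lemma pvFoldA_contains (l : List Int) (d : PySem.Dict Int Int) (x : Int) :
    (l.foldl pvStepA d).contains x = (d.contains x || decide (x ∈ l)) := by
  induction l generalizing d with
  | nil => simp
  | cons a t ih =>
    rw [List.foldl_cons, ih, pvStepA_contains]
    by_cases h : x = a
    · subst h; simp
    · rw [show (x == a) = false from by simp [h]]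
      simp [h]

-- A returns true iff every endpoint occurs an even number of times in the flattened list
lemma pvA_iff (graph : List (Int × Int)) :
    is_tour graph = true ↔
      ∀ x ∈ graph.flatMap (fun pair => [pair.1, pair.2]),
        2 ∣ (graph.flatMap (fun pair => [pair.1, pair.2])).count x := by
  unfold is_tour
  rw [pvFoldA_flat]
  set l := graph.flatMap (fun pair => [pair.1, pair.2]) with hl
  rw [List.all_eq_true]
  constructor
  · intro h x hx
    have hk : x ∈ (l.foldl pvStepA PySem.Dict.empty).keys := by
      rw [← PySem.Dict.contains_iff_mem_keys, pvFoldA_contains]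
      simp [hx]
    have := h x hk
    rw [pvFoldA_getD] at this
    simp only [PySem.Dict.getD_empty, zero_add, Bool.not_eq_eq_eq_not, Bool.not_true] at this
    rw [bne_eq_false_iff_eq, PySem.Int.mod_eq_zero_iff_dvd] at this
    exact_mod_cast this
  · intro h x hk
    have hx : x ∈ l := by
      rw [← PySem.Dict.contains_iff_mem_keys, pvFoldA_contains] at hk
      simpa using hk
    have hdvd : (2 : Int) ∣ (l.count x : Int) := by exact_mod_cast h x hx
    rw [pvFoldA_getD]
    simp only [PySem.Dict.getD_empty, zero_add, Bool.not_eq_eq_eq_not, Bool.not_true]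
    rw [bne_eq_false_iff_eq, PySem.Int.mod_eq_zero_iff_dvd]
    exact hdvd

-- on a ≤-sorted list, pairing up adjacently is exactly all-counts-even
lemma pvPaired_iff (l : List Int) (h : l.Pairwise (· ≤ ·)) :
    pvPaired l = true ↔ ∀ x ∈ l, 2 ∣ l.count x := by
  induction l using pvPaired.induct with
  | case1 => simp [pvPaired]
  | case2 a =>
    simp only [pvPaired, Bool.false_eq_true, false_iff]
    intro hall
    simpa using hall a (by simp)
  | case3 a b t hne =>
    have hab : a ≠ b := by simpa using hne
    simp only [pvPaired, hne, if_true, Bool.false_eq_true, false_iff]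
    intro hall
    have hle := List.pairwise_cons.mp h
    have hltb : a < b := lt_of_le_of_ne (hle.1 b (by simp)) hab
    have hlt : ∀ y ∈ b :: t, a < y := by
      intro y hy
      rcases List.mem_cons.mp hy with rfl | hy
      · exact hltb
      · exact lt_of_lt_of_le hltb ((List.pairwise_cons.mp hle.2).1 y hy)
    have hnot : a ∉ b :: t := fun hmem => lt_irrefl a (hlt a hmem)
    have hcount : (a :: b :: t).count a = 1 := by
      rw [List.count_cons_self, List.count_eq_zero_of_not_mem hnot]
    have h1 := hall a (by simp)
    rw [hcount] at h1
    omega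
  | case4 a b t hne ih =>
    have hab : a = b := by simpa using hne
    subst hab
    have ht : t.Pairwise (· ≤ ·) := (List.pairwise_cons.mp (List.pairwise_cons.mp h).2).2
    simp only [pvPaired, bne_self_eq_false, Bool.false_eq_true, if_false]
    rw [ih ht]
    have hc : ∀ x : Int, (a :: a :: t).count x = t.count x + (if x = a then 2 else 0) := by
      intro x
      by_cases hxa : x = a
      · subst hxa; simp
      · simp [hxa, Ne.symm hxa]
    constructor
    · intro hall x hx
      rw [hc]
      by_cases hxa : x = a
      · have hta : 2 ∣ t.count x := by
          by_cases hmem : x ∈ t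
          · exact hall x hmem
          · simp [List.count_eq_zero_of_not_mem hmem]
        rw [if_pos hxa]
        omega
      · rw [if_neg hxa]
        have hxt : x ∈ t := by
          rcases List.mem_cons.mp hx with rfl | hx2
          · exact absurd rfl hxa
          rcases List.mem_cons.mp hx2 with rfl | hx3
          · exact absurd rfl hxa
          · exact hx3
        have := hall x hxt
        omega
    · intro hall x hx
      have h1 := hall x (by simp [hx])
      rw [hc] at h1
      by_cases hxa : x = a
      · rw [if_pos hxa] at h1
        omega
      · rw [if_neg hxa] at h1
        omega

-- ===== VERDICT (by name: the statement is the Claim_ definition above) =====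
theorem is_tour_spec : Claim_equal_is_tour := by
  intro graph _
  unfold Spec_is_tour
  rw [Bool.eq_iff_iff, pvA_iff]
  unfold is_tour_alt
  set l := graph.flatMap (fun pair => [pair.1, pair.2]) with hl
  rw [pvAlt_eq_paired]
  have hperm : (PySem.List.sorted l (fun x => x) false).Perm l := PySem.List.sorted_perm l _ _
  rw [pvPaired_iff _ (PySem.List.sorted_pairwise l (fun x => x))]
  constructor
  · intro h x hx
    rw [hperm.count_eq]
    exact h x (hperm.mem_iff.mp hx)
  · intro h x hx
    have := h x (hperm.mem_iff.mpr hx)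
    rwa [hperm.count_eq] at this
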